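-- pv_equiv track=rewrite | github.com/simoncharmms/roboadvisor | send_whatsapp.py | build_highlights
-- ===== SOURCE A (Python) =====
-- def build_highlights(dashboard: dict) -> str:
--     """Extract top 2 LLM rationale bullets from actionable or conflicted signals.
--
--     Parameters
--     ----------
--     dashboard : dict
--
--     Returns
--     -------
--     str
--     """
--     suggestions = dashboard.get("suggestions", [])
--     latest: dict[str, dict] = {}
--     for s in suggestions:
--         latest[s["ticker"]] = s
--
--     candidates = []
--     for t, s in latest.items():
--         q = s.get("quant_signal", "HOLD")
--         l = s.get("llm_recommendation", "HOLD")
--         rationale = s.get("llm_rationale", "")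
--         if not rationale:
--             continue
--         # Priority: conflicts first, then actionable signals
--         priority = 0 if (q != l and q and l) else (1 if l in ("BUY","SELL") else 2)
--         candidates.append((priority, t, rationale))
--
--     candidates.sort(key=lambda x: x[0])
--     bullets = []
--     for _, ticker, rationale in candidates[:2]:
--         # First sentence only
--         sentence = rationale.split(".")[0].strip() + "."
--         bullets.append(f"• {ticker}: \"{sentence}\"")
--
--     return "\n".join(bullets) if bullets else "• No actionable highlights today."
-- ===== SOURCE B (Python) =====
-- def build_highlights(dashboard: dict) -> str:
--     """Extract top 2 LLM rationale bullets from actionable or conflicted signals."""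
--     latest = {}
--     for s in dashboard.get("suggestions", []):
--         latest[s["ticker"]] = s
--
--     # Distribute candidates into three priority buckets in one pass
--     # (0 = conflict, 1 = actionable, 2 = other), preserving first-seen order,
--     # instead of sorting: concatenation reproduces the stable sort by priority.
--     conflicts, actionable, other = [], [], []
--     for t, s in latest.items():
--         q = s.get("quant_signal", "HOLD")
--         l = s.get("llm_recommendation", "HOLD")
--         rationale = s.get("llm_rationale", "")
--         if not rationale:
--             continue
--         if q != l and q and l:
--             conflicts.append((t, rationale))
--         elif l in ("BUY", "SELL"):
--             actionable.append((t, rationale))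
--         else:
--             other.append((t, rationale))
--
--     top = (conflicts + actionable + other)[:2]
--     if not top:
--         return "• No actionable highlights today."
--     lines = []
--     for t, rationale in top:
--         sentence = rationale.split(".")[0].strip() + "."
--         lines.append(f"• {t}: \"{sentence}\"")
--     return "\n".join(lines)
-- ===== Notes on version B (the rewrite author's own statement) =====
-- stated objective: alternative
-- what changed: Replaces the stable sort of candidate triples by priority with a single-pass distribution into three priority buckets (conflict/actionable/other) whose concatenation reproduces the stable order; formatting then runs on the first two bucket entries.
import Mathlib
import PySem

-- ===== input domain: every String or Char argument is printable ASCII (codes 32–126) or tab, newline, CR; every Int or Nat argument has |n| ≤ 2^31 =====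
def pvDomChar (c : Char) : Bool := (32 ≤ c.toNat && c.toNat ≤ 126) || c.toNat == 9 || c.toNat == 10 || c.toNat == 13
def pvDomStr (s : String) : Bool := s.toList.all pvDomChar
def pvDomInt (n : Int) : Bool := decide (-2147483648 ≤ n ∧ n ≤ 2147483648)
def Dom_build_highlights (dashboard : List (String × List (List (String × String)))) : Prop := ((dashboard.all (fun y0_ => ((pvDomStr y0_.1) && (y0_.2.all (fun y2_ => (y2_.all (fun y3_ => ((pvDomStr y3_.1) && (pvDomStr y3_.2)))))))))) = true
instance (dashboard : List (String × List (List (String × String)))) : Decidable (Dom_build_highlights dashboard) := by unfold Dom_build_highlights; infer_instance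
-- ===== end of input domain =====

-- B replaces A's stable sort by priority with a one-pass distribution into three
-- priority buckets whose concatenation reproduces the same stable order (alternative decomposition).

-- shared helpers (identical code in both Pythons): dict .get with default, and the bullet formatter
def pvGetS (s : List (String × String)) (k dflt : String) : String :=
  ((PySem.Dict.mk s).get? k).getD dflt

def pvBullet (t r : String) : String :=
  let sentence := PySem.Str.strip (((PySem.Str.split? r ".").getD []).getD 0 "") ++ "."
  "• " ++ t ++ ": \"" ++ sentence ++ "\""

-- both Pythons build `latest` with the same loop (last-wins dedup by ticker)
def pvLatest (dashboard : List (String × List (List (String × String)))) :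
    PySem.Dict String (List (String × String)) :=
  (((PySem.Dict.mk dashboard).get? "suggestions").getD []).foldl
    (fun d s => d.insert (pvGetS s "ticker" "") s) PySem.Dict.empty

-- ===== PORT A =====
-- A's loop body: skip empty rationale, append (priority, ticker, rationale)
def pvStepA (acc : List (Int × String × String)) (ts : String × List (String × String)) :
    List (Int × String × String) :=
  let q := pvGetS ts.2 "quant_signal" "HOLD"
  let l := pvGetS ts.2 "llm_recommendation" "HOLD"
  let rationale := pvGetS ts.2 "llm_rationale" ""
  if rationale = "" then acc
  else
    let priority : Int :=
      if q ≠ l ∧ q ≠ "" ∧ l ≠ "" then 0 else if l = "BUY" ∨ l = "SELL" then 1 else 2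
    acc ++ [(priority, ts.1, rationale)]

def build_highlights (dashboard : List (String × List (List (String × String)))) : String :=
  let candidates := (pvLatest dashboard).items.foldl pvStepA []
  let sortedc := PySem.List.sorted candidates (fun x => x.1) false
  let bullets := (sortedc.take 2).foldl (fun acc x => acc ++ [pvBullet x.2.1 x.2.2]) []
  if bullets = [] then "• No actionable highlights today." else PySem.Str.join "\n" bullets

-- ===== PORT B =====
-- B's loop body: distribute (ticker, rationale) into the three priority buckets
def pvStepB
    (b : List (String × String) × List (String × String) × List (String × String))
    (ts : String × List (String × String)) :
    List (String × String) × List (String × String) × List (String × String) :=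
  let q := pvGetS ts.2 "quant_signal" "HOLD"
  let l := pvGetS ts.2 "llm_recommendation" "HOLD"
  let rationale := pvGetS ts.2 "llm_rationale" ""
  if rationale = "" then b
  else if q ≠ l ∧ q ≠ "" ∧ l ≠ "" then (b.1 ++ [(ts.1, rationale)], b.2.1, b.2.2)
  else if l = "BUY" ∨ l = "SELL" then (b.1, b.2.1 ++ [(ts.1, rationale)], b.2.2)
  else (b.1, b.2.1, b.2.2 ++ [(ts.1, rationale)])

def build_highlights_alt (dashboard : List (String × List (List (String × String)))) : String :=
  let buckets := (pvLatest dashboard).items.foldl pvStepB ([], [], [])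
  let top := (buckets.1 ++ buckets.2.1 ++ buckets.2.2).take 2
  match top with
  | [] => "• No actionable highlights today."
  | _ => PySem.Str.join "\n" (top.map (fun p => pvBullet p.1 p.2))

-- ===== PRECONDITION & SPEC =====
-- Pre_ excludes exactly the inputs where A raises KeyError: a suggestion without a "ticker" key.
def Pre_build_highlights (dashboard : List (String × List (List (String × String)))) : Prop :=
  ((((PySem.Dict.mk dashboard).get? "suggestions").getD []).all
    (fun s => s.any (fun p => p.1 == "ticker"))) = true

instance (dashboard : List (String × List (List (String × String)))) : Decidable (Pre_build_highlights dashboard) := by unfold Pre_build_highlights; infer_instance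

def pvWitness_build_highlights : (List (String × List (List (String × String)))) :=
  [("suggestions",
    [[("ticker", "AAPL"), ("llm_recommendation", "BUY"), ("llm_rationale", "Strong growth. More later.")],
     [("ticker", "MSFT"), ("quant_signal", "SELL"), ("llm_rationale", "Overbought.")]])]

def Spec_build_highlights (dashboard : List (String × List (List (String × String)))) (out : String) : Prop := out = build_highlights_alt dashboard
instance (dashboard : List (String × List (List (String × String)))) (out : String) : Decidable (Spec_build_highlights dashboard out) := by unfold Spec_build_highlights; infer_instance

-- ===== CLAIM (what is proved, stated in full; the proofs are below) =====
def Claim_equal_build_highlights : Prop := ∀ (dashboard : List (String × List (List (String × String)))), Dom_build_highlights dashboard → Pre_build_highlights dashboard → Spec_build_highlights dashboard (build_highlights dashboard)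

-- ===== LEMMAS AND PROOFS =====

-- proof-side views of the loop bodies
def pvRat (s : List (String × String)) : String := pvGetS s "llm_rationale" ""

def pvPri (s : List (String × String)) : Int :=
  if pvGetS s "quant_signal" "HOLD" ≠ pvGetS s "llm_recommendation" "HOLD" ∧
      pvGetS s "quant_signal" "HOLD" ≠ "" ∧ pvGetS s "llm_recommendation" "HOLD" ≠ "" then 0
  else if pvGetS s "llm_recommendation" "HOLD" = "BUY" ∨
      pvGetS s "llm_recommendation" "HOLD" = "SELL" then 1
  else 2

def pvKept (ts : String × List (String × String)) : Bool := !(pvRat ts.2 == "")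

theorem pvPri_mem (s : List (String × String)) : pvPri s = 0 ∨ pvPri s = 1 ∨ pvPri s = 2 := by
  unfold pvPri; split_ifs <;> simp

theorem candA (l : List (String × List (String × String)))
    (acc : List (Int × String × String)) :
    l.foldl pvStepA acc =
      acc ++ (l.filter pvKept).map (fun ts => (pvPri ts.2, ts.1, pvRat ts.2)) := by
  induction l generalizing acc with
  | nil => simp
  | cons ts t ih =>
    simp only [List.foldl_cons, List.filter_cons, ih]
    by_cases h : pvGetS ts.2 "llm_rationale" "" = ""
    · simp [pvStepA, pvKept, pvRat, h]
    · simp [pvStepA, pvKept, pvRat, pvPri, h]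

theorem candB (l : List (String × List (String × String)))
    (b : List (String × String) × List (String × String) × List (String × String)) :
    l.foldl pvStepB b =
      (b.1 ++ (l.filter (fun ts => pvKept ts && pvPri ts.2 == 0)).map (fun ts => (ts.1, pvRat ts.2)),
       b.2.1 ++ (l.filter (fun ts => pvKept ts && pvPri ts.2 == 1)).map (fun ts => (ts.1, pvRat ts.2)),
       b.2.2 ++ (l.filter (fun ts => pvKept ts && pvPri ts.2 == 2)).map (fun ts => (ts.1, pvRat ts.2))) := by
  induction l generalizing b with
  | nil => simp
  | cons ts t ih =>
    simp only [List.foldl_cons, List.filter_cons, ih]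
    by_cases h : pvGetS ts.2 "llm_rationale" "" = ""
    · simp [pvStepB, pvKept, pvRat, h]
    · by_cases h0 : pvGetS ts.2 "quant_signal" "HOLD" ≠ pvGetS ts.2 "llm_recommendation" "HOLD" ∧
          pvGetS ts.2 "quant_signal" "HOLD" ≠ "" ∧ pvGetS ts.2 "llm_recommendation" "HOLD" ≠ ""
      · simp [pvStepB, pvKept, pvRat, pvPri, h, h0]
      · by_cases h1 : pvGetS ts.2 "llm_recommendation" "HOLD" = "BUY" ∨
            pvGetS ts.2 "llm_recommendation" "HOLD" = "SELL"
        · simp [pvStepB, pvKept, pvRat, pvPri, h, h0, h1]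
        · simp [pvStepB, pvKept, pvRat, pvPri, h, h0, h1]

theorem insertBy_append {α : Type} (before : α → α → Bool) (x : α) (A B : List α)
    (h : ∀ y ∈ A, before x y = false) :
    PySem.List.insertBy before x (A ++ B) = A ++ PySem.List.insertBy before x B := by
  induction A with
  | nil => simp
  | cons a t ih =>
    have ha : before x a = false := h a (by simp)
    simp [PySem.List.insertBy, ha, ih (fun y hy => h y (by simp [hy]))]

theorem insertBy_front {α : Type} (before : α → α → Bool) (x : α) (B : List α)
    (h : ∀ y ∈ B, before x y = true) :
    PySem.List.insertBy before x B = x :: B := by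
  cases B with
  | nil => simp [PySem.List.insertBy]
  | cons b t => simp [PySem.List.insertBy, h b (by simp)]

theorem sorted3 (l : List (Int × String × String))
    (h : ∀ x ∈ l, x.1 = 0 ∨ x.1 = 1 ∨ x.1 = 2) :
    PySem.List.sorted l (fun x => x.1) false =
      l.filter (fun x => x.1 == 0) ++ l.filter (fun x => x.1 == 1) ++ l.filter (fun x => x.1 == 2) := by
  rw [PySem.List.sorted_eq_foldl_insertBy]
  induction l using List.reverseRecOn with
  | nil => simp
  | append_singleton t x ih =>
    have ht : ∀ y ∈ t, y.1 = 0 ∨ y.1 = 1 ∨ y.1 = 2 := fun y hy => h y (by simp [hy])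
    rw [List.foldl_append, List.foldl_cons, List.foldl_nil, ih ht]
    have hx := h x (by simp)
    have m0 : ∀ y ∈ t.filter (fun x => x.1 == 0), y.1 = (0 : Int) := by
      intro y hy; simpa using (List.of_mem_filter hy)
    have m1 : ∀ y ∈ t.filter (fun x => x.1 == 1), y.1 = (1 : Int) := by
      intro y hy; simpa using (List.of_mem_filter hy)
    have m2 : ∀ y ∈ t.filter (fun x => x.1 == 2), y.1 = (2 : Int) := by
      intro y hy; simpa using (List.of_mem_filter hy)
    rcases hx with hx | hx | hx
    · rw [List.append_assoc,
        insertBy_append _ x _ _ (by intro y hy; simp [m0 y hy, hx]),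
        insertBy_front _ x _ (by
          intro y hy
          rcases List.mem_append.1 hy with hy | hy
          · simp [m1 y hy, hx]
          · simp [m2 y hy, hx])]
      simp [List.filter_append, hx]
    · rw [insertBy_append _ x _ _ (by
          intro y hy
          rcases List.mem_append.1 hy with hy | hy
          · simp [m0 y hy, hx]
          · simp [m1 y hy, hx]),
        insertBy_front _ x _ (by intro y hy; simp [m2 y hy, hx])]
      simp [List.filter_append, hx]
    · rw [PySem.List.insertBy_of_forall_not_before _ x _ (by
          intro y hy
          rcases List.mem_append.1 hy with hy | hy
          · rcases List.mem_append.1 hy with hy | hy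
            · simp [m0 y hy, hx]
            · simp [m1 y hy, hx]
          · simp [m2 y hy, hx])]
      simp [List.filter_append, hx]

theorem bullets_fold (l : List (Int × String × String)) (acc : List String) :
    l.foldl (fun acc x => acc ++ [pvBullet x.2.1 x.2.2]) acc =
      acc ++ l.map (fun x => pvBullet x.2.1 x.2.2) := by
  induction l generalizing acc with
  | nil => simp
  | cons x t ih => simp [ih]

-- ===== VERDICT (by name: the statement is the Claim_ definition above) =====
theorem build_highlights_spec : Claim_equal_build_highlights := by
  intro dashboard _ _
  unfold Spec_build_highlights build_highlights build_highlights_alt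
  set L := (pvLatest dashboard).items with hL
  rw [candA, candB]
  simp only [List.nil_append]
  set C := (L.filter pvKept).map (fun ts => (pvPri ts.2, ts.1, pvRat ts.2)) with hC
  have hmem : ∀ x ∈ C, x.1 = 0 ∨ x.1 = 1 ∨ x.1 = 2 := by
    intro x hx
    rcases List.mem_map.1 hx with ⟨ts, _, rfl⟩
    exact pvPri_mem ts.2
  rw [sorted3 C hmem]
  have hfil : ∀ i : Int,
      (L.filter (fun ts => pvKept ts && pvPri ts.2 == i)).map (fun ts => (ts.1, pvRat ts.2)) =
        (C.filter (fun x => x.1 == i)).map (fun x => (x.2.1, x.2.2)) := by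
    intro i
    rw [hC, List.filter_map, List.map_map, List.filter_filter]
    simp only [Function.comp_def]
    rw [List.filter_congr (fun x _ => Bool.and_comm _ _)]
  rw [hfil 0, hfil 1, hfil 2, ← List.map_append, ← List.map_append, ← List.map_take,
    bullets_fold]
  simp only [List.nil_append]
  set T := (C.filter (fun x => x.1 == 0) ++ C.filter (fun x => x.1 == 1) ++
    C.filter (fun x => x.1 == 2)).take 2 with hT
  cases T with
  | nil => simp
  | cons a t => simp [List.map_map, Function.comp_def]
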